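-- pv_equiv track=rewrite | github.com/F43M/DevAI-R1 | Scraper_Wiki/processing/pipeline.py | balance_languages
-- ===== SOURCE A (Python) =====
-- from typing import Callable, Dict, List
--
-- def balance_languages(records: List[Dict]) -> List[Dict]:
--     """Return ``records`` balanced across code languages."""
--     groups: Dict[str, List[Dict]] = {}
--     for rec in records:
--         lang = rec.get("metadata", {}).get("code_language", "unknown")
--         groups.setdefault(lang, []).append(rec)
--     if not groups:
--         return records
--     min_count = min(len(v) for v in groups.values())
--     balanced: List[Dict] = []
--     for lang in sorted(groups):
--         balanced.extend(groups[lang][:min_count])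
--     return balanced
-- ===== SOURCE B (Python) =====
-- def balance_languages(records):
--     """Return ``records`` balanced across code languages."""
--     keys = [rec.get("metadata", {}).get("code_language", "unknown") for rec in records]
--     langs = sorted(set(keys))
--     if not langs:
--         return records
--     min_count = min(keys.count(lang) for lang in langs)
--     balanced = []
--     for lang in langs:
--         balanced.extend([rec for rec, k in zip(records, keys) if k == lang][:min_count])
--     return balanced
-- ===== Notes on version B (the rewrite author's own statement) =====
-- stated objective: alternative
-- what changed: Instead of accumulating a dict of per-language groups in one pass and slicing it, B computes the list of language keys, takes the sorted distinct languages, gets min_count as the minimum of keys.count(lang), and builds the result by filtering the original records per language and truncating to min_count.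
import Mathlib
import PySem

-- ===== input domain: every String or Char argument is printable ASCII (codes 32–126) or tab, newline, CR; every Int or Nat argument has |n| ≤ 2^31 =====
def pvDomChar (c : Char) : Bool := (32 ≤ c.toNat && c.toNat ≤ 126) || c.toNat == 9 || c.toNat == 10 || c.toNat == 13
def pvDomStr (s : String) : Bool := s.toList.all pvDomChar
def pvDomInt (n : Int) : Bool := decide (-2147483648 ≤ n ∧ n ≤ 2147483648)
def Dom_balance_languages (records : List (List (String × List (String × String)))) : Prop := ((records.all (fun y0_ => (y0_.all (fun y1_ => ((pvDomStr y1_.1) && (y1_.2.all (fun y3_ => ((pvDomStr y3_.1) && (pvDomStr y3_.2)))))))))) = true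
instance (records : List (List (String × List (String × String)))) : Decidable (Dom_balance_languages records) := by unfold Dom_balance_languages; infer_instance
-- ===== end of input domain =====

-- B replaces A's dict-of-groups accumulation by sorted distinct language keys, a min over
-- per-language counts, and a per-language filter of the original list (objective: alternative).


-- rec.get("metadata", {}).get("code_language", "unknown")  (a subexpression both Pythons share verbatim)
def pvLang (rec : List (String × List (String × String))) : String :=
  (PySem.Dict.mk ((PySem.Dict.mk rec).getD "metadata" [])).getD "code_language" "unknown"

-- ===== PORT A =====
-- groups.setdefault(lang, []).append(rec) ≡ groups[lang] = groups.get(lang, []) + [rec], i.e. Dict.modify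
def balance_languages (records : List (List (String × List (String × String)))) : List (List (String × List (String × String))) :=
  let groups : PySem.Dict String (List (List (String × List (String × String)))) :=
    records.foldl (fun g rec => g.modify (pvLang rec) [] (fun v => v ++ [rec])) PySem.Dict.empty
  if groups.size = 0 then records  -- `if not groups`
  else
    -- min(len(v) for v in groups.values()); groups is nonempty here so min? is some
    let minCount : Nat := (PySem.List.min? (groups.values.map List.length) (fun x => x)).getD 0
    (PySem.List.sorted groups.keys (fun x => x)).foldl
      (fun bal lang => bal ++ (groups.getD lang []).take minCount) []  -- xs[:n] with n : Nat is take

-- ===== PORT B =====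
def balance_languages_alt (records : List (List (String × List (String × String)))) : List (List (String × List (String × String))) :=
  let keys := records.map pvLang
  let langs := PySem.List.sorted (PySem.Set.ofList keys) (fun x => x)  -- sorted(set(keys))
  if langs = [] then records
  else
    -- min(keys.count(lang) for lang in langs); langs nonempty here so min? is some
    let minCount : Nat := (PySem.List.min? (langs.map (fun l => PySem.List.count keys l)) (fun x => x)).getD 0
    langs.foldl
      (fun bal lang =>
        bal ++ (((records.zip keys).filter (fun p => p.2 == lang)).map (fun p => p.1)).take minCount) []

-- ===== PRECONDITION & SPEC =====
def Spec_balance_languages (records : List (List (String × List (String × String)))) (out : List (List (String × List (String × String)))) : Prop := out = balance_languages_alt records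
instance (records : List (List (String × List (String × String)))) (out : List (List (String × List (String × String)))) : Decidable (Spec_balance_languages records out) := by unfold Spec_balance_languages; infer_instance

-- ===== CLAIM (what is proved, stated in full; the proofs are below) =====
def Claim_equal_balance_languages : Prop := ∀ (records : List (List (String × List (String × String)))), Dom_balance_languages records → Spec_balance_languages records (balance_languages records)

-- ===== LEMMAS AND PROOFS =====

-- A's groups dict, named for the proofs
def pvGroups (records : List (List (String × List (String × String)))) : PySem.Dict String (List (List (String × List (String × String)))) :=
  records.foldl (fun g rec => g.modify (pvLang rec) [] (fun v => v ++ [rec])) PySem.Dict.empty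

lemma pvGroups_keys (records : List (List (String × List (String × String)))) :
    (pvGroups records).keys = PySem.Set.ofList (records.map pvLang) := by
  unfold pvGroups
  rw [PySem.Dict.keys_foldl_modify_key records pvLang [] (fun _ rec => fun v => v ++ [rec])]
  simp [PySem.Dict.keys_empty]
  rfl

lemma pvGroups_keys_nodup (records : List (List (String × List (String × String)))) :
    (pvGroups records).keys.Nodup := by
  unfold pvGroups
  exact PySem.Dict.nodup_keys_foldl_modify_key records pvLang [] (fun _ rec => fun v => v ++ [rec]) _ PySem.Dict.nodup_keys_empty

lemma pvGroups_getD (records : List (List (String × List (String × String)))) (l : String) :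
    (pvGroups records).getD l []
      = ((records.zip (records.map pvLang)).filter (fun p => p.2 == l)).map (fun p => p.1) := by
  unfold pvGroups
  have h2 : records.zip (records.map pvLang) = records.map (fun r => (r, pvLang r)) := by
    induction records with
    | nil => rfl
    | cons r rs ih => simpa using ih
  have h1 : records.foldl (fun g rec => g.modify (pvLang rec) [] (fun v => v ++ [rec])) PySem.Dict.empty
      = (records.map (fun r => (pvLang r, r))).foldl (fun d p => d.modify p.1 [] (fun v => v ++ [p.2])) PySem.Dict.empty := by
    rw [List.foldl_map]
  rw [h1, PySem.Dict.getD_foldl_modify_append]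
  rw [h2]
  simp only [List.filter_map, List.map_map]
  rfl

lemma pvGroup_len (records : List (List (String × List (String × String)))) (l : String) :
    ((pvGroups records).getD l []).length = PySem.List.count (records.map pvLang) l := by
  rw [pvGroups_getD]
  induction records with
  | nil => rfl
  | cons r rs ih =>
      by_cases h : pvLang r = l <;>
        simp [PySem.List.count, h] at ih ⊢ <;> omega

lemma pvMin_perm {xs ys : List Nat} (h : xs.Perm ys) :
    (PySem.List.min? xs (fun x => x)).getD 0 = (PySem.List.min? ys (fun x => x)).getD 0 := by
  rcases hx : PySem.List.min? xs (fun x => x) with _ | m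
  · have : xs = [] := by
      rwa [PySem.List.min?_eq_none_iff] at hx
    subst this
    have hy : ys = [] := h.symm.eq_nil
    subst hy
    rfl
  · have hy : ys ≠ [] := by
      intro hnil; subst hnil
      have hmem := PySem.List.min?_mem hx
      rw [h.eq_nil] at hmem
      cases hmem
    rcases hy2 : PySem.List.min? ys (fun x => x) with _ | m'
    · rw [PySem.List.min?_eq_none_iff] at hy2; exact absurd hy2 hy
    · have h1 := PySem.List.min?_isMin hx
      have h2 := PySem.List.min?_isMin hy2
      have hm : m ∈ ys := h.mem_iff.mp (PySem.List.min?_mem hx)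
      have hm' : m' ∈ xs := h.mem_iff.mpr (PySem.List.min?_mem hy2)
      simp only [Option.getD_some]
      exact le_antisymm (h1 m' hm') (h2 m hm)

lemma pvMain (records : List (List (String × List (String × String)))) :
    balance_languages records = balance_languages_alt records := by
  have hA : balance_languages records =
      if (pvGroups records).size = 0 then records
      else
        (PySem.List.sorted (pvGroups records).keys (fun x => x)).foldl
          (fun bal lang => bal ++ ((pvGroups records).getD lang []).take
            ((PySem.List.min? ((pvGroups records).values.map List.length) (fun x => x)).getD 0)) [] := rfl
  rw [hA]
  unfold balance_languages_alt
  cases records with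
  | nil => rfl
  | cons r rs =>
      set records := r :: rs with hrec
      set keys := records.map pvLang with hkeys
      have hsize : (pvGroups records).size ≠ 0 := by
        have : (pvGroups records).keys ≠ [] := by
          rw [pvGroups_keys]
          intro hnil
          have : pvLang r ∈ PySem.Set.ofList keys := by
            rw [PySem.Set.mem_ofList, hkeys, hrec]; simp
          rw [hnil] at this; cases this
        intro h0
        apply this
        have : (pvGroups records).keys.length = 0 := by
          simp only [PySem.Dict.keys, List.length_map]
          exact h0
        exact List.eq_nil_of_length_eq_zero this
      have hlangs : PySem.List.sorted (PySem.Set.ofList keys) (fun x => x) ≠ [] := by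
        rw [Ne, PySem.List.sorted_eq_nil_iff]
        intro hnil
        have : pvLang r ∈ PySem.Set.ofList keys := by
          rw [PySem.Set.mem_ofList, hkeys, hrec]; simp
        rw [hnil] at this; cases this
      rw [if_neg hsize, if_neg hlangs]
      -- the two language lists coincide
      have hk : PySem.List.sorted (pvGroups records).keys (fun x => x)
          = PySem.List.sorted (PySem.Set.ofList keys) (fun x => x) := by
        rw [pvGroups_keys]
      -- the two min counts coincide
      have hmin : (PySem.List.min? ((pvGroups records).values.map List.length) (fun x => x)).getD 0
          = (PySem.List.min? ((PySem.List.sorted (PySem.Set.ofList keys) (fun x => x)).map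
              (fun l => PySem.List.count keys l)) (fun x => x)).getD 0 := by
        have hv : (pvGroups records).values.map List.length
            = (pvGroups records).keys.map (fun k => PySem.List.count keys k) := by
          rw [PySem.Dict.values_eq_map_keys (pvGroups records) (pvGroups_keys_nodup records) []]
          rw [List.map_map]
          exact List.map_congr_left (fun k _ => pvGroup_len records k)
        rw [hv, pvGroups_keys]
        exact pvMin_perm ((PySem.List.sorted_perm _ _ _).map _).symm
      rw [hk, hmin]
      apply PySem.List.foldl_congr_mem
      intro acc lang _
      rw [pvGroups_getD]

-- ===== VERDICT (by name: the statement is the Claim_ definition above) =====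
theorem balance_languages_spec : Claim_equal_balance_languages := by
  intro records _
  exact pvMain records
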